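-- pv_equiv track=rewrite | github.com/take-works-tech/arc-agi2-arc2025 | src/hybrid_system/inference/program_synthesis/candidate_generator.py | _infer_target_color_from_output
-- ===== SOURCE A (Python) =====
-- from typing import List, Dict, Any, Optional
--
-- def _infer_target_color_from_output(output_grid: List[List[int]]) -> int:
--     """出力グリッドから代表的な色を推定する"""
--     from collections import Counter
--     flat_colors = [c for row in output_grid for c in row if c != 0]
--     if not flat_colors:
--         return 1
--     counter = Counter(flat_colors)
--     most_common_color, _ = max(counter.items(), key=lambda kv: (kv[1], -kv[0]))
--     return int(most_common_color)
-- ===== SOURCE B (Python) =====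
-- def _infer_target_color_from_output(output_grid):
--     """Sort the non-zero colors, then scan the equal runs once: the longest run wins,
--     and on equal length the earlier (smaller) color is kept."""
--     s = sorted(c for row in output_grid for c in row if c != 0)
--     if not s:
--         return 1
--     best, best_len = s[0], 0
--     i, n = 0, len(s)
--     while i < n:
--         j = i
--         while j < n and s[j] == s[i]:
--             j += 1
--         if j - i > best_len:
--             best, best_len = s[i], j - i
--         i = j
--     return int(best)
-- ===== Notes on version B (the rewrite author's own statement) =====
-- stated objective: alternative
-- what changed: B replaces A's Counter-and-max-over-items with a sort-then-scan: it sorts the non-zero colors, then walks the sorted list once, measuring each equal-value run and keeping the first longest run, which makes A's hash index and key function disappear and turns the tie-break into plain left-to-right scanning of ascending colors.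
import Mathlib
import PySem

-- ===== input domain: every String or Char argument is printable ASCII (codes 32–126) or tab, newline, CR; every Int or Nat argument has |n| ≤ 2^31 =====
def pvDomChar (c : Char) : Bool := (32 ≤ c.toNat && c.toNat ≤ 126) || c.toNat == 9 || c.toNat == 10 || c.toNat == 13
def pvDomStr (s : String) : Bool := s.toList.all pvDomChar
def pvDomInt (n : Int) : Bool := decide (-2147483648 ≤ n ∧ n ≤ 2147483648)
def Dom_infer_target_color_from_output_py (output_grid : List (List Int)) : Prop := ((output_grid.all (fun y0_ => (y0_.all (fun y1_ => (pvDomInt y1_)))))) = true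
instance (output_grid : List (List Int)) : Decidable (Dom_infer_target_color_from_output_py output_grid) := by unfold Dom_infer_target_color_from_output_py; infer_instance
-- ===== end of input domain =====

-- B sorts the non-zero colors and scans the equal-value runs once (longest run, earliest on ties)
-- instead of A's Counter plus max over its items (alternative algorithm, same results).

-- ===== PORT A =====
-- flatten non-zero colors, build Counter, max over items by (count, -color)
def infer_target_color_from_output_py (output_grid : List (List Int)) : Int :=
  let flat_colors := output_grid.flatMap (fun row => row.filter (fun c => decide (c ≠ 0)))
  if flat_colors = [] then 1
  else
    let counter := PySem.Dict.counter flat_colors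
    match PySem.List.max2? counter.items (fun kv => kv.2) (fun kv => -kv.1) with
    | some kv => kv.1
    | none => 1  -- unreachable: counter.items is nonempty on this branch

-- ===== PORT B =====
-- the outer while loop of Source B: one call per run of equal values; (best, blen) is the
-- running best; the inner 'while j < n and s[j] == s[i]' is the takeWhile/dropWhile split
def pvScan (best : Int) (blen : Nat) : List Int → Int
  | [] => best
  | c :: t =>
    let run := 1 + (t.takeWhile (fun d => d == c)).length
    let rest := t.dropWhile (fun d => d == c)
    if blen < run then pvScan c run rest else pvScan best blen rest
termination_by l => l.length
decreasing_by all_goals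
  simpa using Nat.lt_succ_of_le (List.Sublist.length_le (List.dropWhile_sublist _))

def infer_target_color_from_output_py_alt (output_grid : List (List Int)) : Int :=
  let s := PySem.List.sorted
    (output_grid.flatMap (fun row => row.filter (fun c => decide (c ≠ 0)))) (fun x => x) false
  match s with
  | [] => 1
  | c :: _ => pvScan c 0 s

-- ===== PRECONDITION & SPEC =====
def Spec_infer_target_color_from_output_py (output_grid : List (List Int)) (out : Int) : Prop := out = infer_target_color_from_output_py_alt output_grid
instance (output_grid : List (List Int)) (out : Int) : Decidable (Spec_infer_target_color_from_output_py output_grid out) := by unfold Spec_infer_target_color_from_output_py; infer_instance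

-- ===== CLAIM (what is proved, stated in full; the proofs are below) =====
def Claim_equal_infer_target_color_from_output_py : Prop := ∀ (output_grid : List (List Int)), Dom_infer_target_color_from_output_py output_grid → Spec_infer_target_color_from_output_py output_grid (infer_target_color_from_output_py output_grid)

-- ===== LEMMAS AND PROOFS =====

-- A's flattened non-zero color list
def pvFlat (output_grid : List (List Int)) : List Int :=
  output_grid.flatMap (fun row => row.filter (fun c => decide (c ≠ 0)))

-- "r is the most frequent element of f, smallest on ties"
def pvBest (f : List Int) (r : Int) : Prop :=
  r ∈ f ∧ ∀ d ∈ f, f.count d < f.count r ∨ (f.count d = f.count r ∧ r ≤ d)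

lemma pvBest_unique (f : List Int) (a b : Int) (ha : pvBest f a) (hb : pvBest f b) : a = b := by
  obtain ⟨hma, ha⟩ := ha
  obtain ⟨hmb, hb⟩ := hb
  have h1 := ha b hmb
  have h2 := hb a hma
  omega

-- A's fold over the counter items, named
def pvArgmax (cnt : Int → Int) (b : Int) (l : List Int) : Int :=
  (l.foldl (fun (st : Int × Int × Int) c =>
      if st.2.1 < cnt c ∨ (st.2.1 = cnt c ∧ st.2.2 < -c) then (c, cnt c, -c) else st)
    (b, cnt b, -b)).1

lemma pvArgmax_nil (cnt : Int → Int) (b : Int) : pvArgmax cnt b [] = b := rfl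

lemma pvArgmax_cons (cnt : Int → Int) (b c : Int) (l : List Int) :
    pvArgmax cnt b (c :: l)
      = if cnt b < cnt c ∨ (cnt b = cnt c ∧ -b < -c)
        then pvArgmax cnt c l else pvArgmax cnt b l := by
  unfold pvArgmax
  simp only [List.foldl_cons]
  split_ifs with h <;> rfl

lemma pvArgmax_best (cnt : Int → Int) : ∀ (l : List Int) (b : Int),
    pvArgmax cnt b l ∈ b :: l ∧
    ∀ d ∈ b :: l, cnt d < cnt (pvArgmax cnt b l) ∨
      (cnt d = cnt (pvArgmax cnt b l) ∧ pvArgmax cnt b l ≤ d) := by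
  intro l
  induction l with
  | nil =>
    intro b
    refine ⟨by simp [pvArgmax_nil], ?_⟩
    intro d hd
    simp only [List.mem_singleton] at hd
    subst hd
    right
    exact ⟨rfl, by simp [pvArgmax_nil]⟩
  | cons c l ih =>
    intro b
    rw [pvArgmax_cons]
    by_cases h : cnt b < cnt c ∨ (cnt b = cnt c ∧ -b < -c)
    · rw [if_pos h]
      obtain ⟨ihm, ihb⟩ := ih c
      refine ⟨?_, ?_⟩
      · rcases List.mem_cons.mp ihm with h' | h' <;> simp [h']
      · intro d hd
        rcases List.mem_cons.mp hd with rfl | hd2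
        · have hc := ihb c List.mem_cons_self
          omega
        · exact ihb d hd2
    · rw [if_neg h]
      obtain ⟨ihm, ihb⟩ := ih b
      refine ⟨?_, ?_⟩
      · rcases List.mem_cons.mp ihm with h' | h' <;> simp [h']
      · intro d hd
        rcases List.mem_cons.mp hd with rfl | hd2
        · exact ihb d List.mem_cons_self
        · rcases List.mem_cons.mp hd2 with rfl | hd3
          · have hb2 := ihb b List.mem_cons_self
            omega
          · exact ihb d (List.mem_cons_of_mem _ hd3)

-- PySem.List.max2? over the mapped key/count pairs as the explicit argmax fold
lemma pvMainLoop (cnt : Int → Int) : ∀ (l : List Int) (b : Int),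
    PySem.List.max2? (List.map (fun c => (c, cnt c)) (b :: l)) (fun kv => kv.2) (fun kv => -kv.1)
    = some (pvArgmax cnt b l, cnt (pvArgmax cnt b l)) := by
  intro l
  induction l with
  | nil => intro b; simp [PySem.List.max2?, pvArgmax_nil]
  | cons c l ih =>
    intro b
    unfold PySem.List.max2? at ih ⊢
    simp only [List.map_cons, List.foldl_cons] at ih ⊢
    rw [pvArgmax_cons]
    by_cases h : cnt b < cnt c ∨ (cnt b = cnt c ∧ -b < -c)
    · have hb : (decide (cnt b < cnt c) || !decide (cnt c < cnt b) && decide (-b < -c)) = true := by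
        simp only [Bool.or_eq_true, Bool.and_eq_true, Bool.not_eq_true', decide_eq_true_eq,
          decide_eq_false_iff_not]
        omega
      rw [if_pos h, hb, if_pos rfl]
      exact ih c
    · have hb : (decide (cnt b < cnt c) || !decide (cnt c < cnt b) && decide (-b < -c)) = false := by
        simp only [Bool.or_eq_false_iff, Bool.and_eq_false_iff, Bool.not_eq_false',
          decide_eq_false_iff_not, decide_eq_true_eq]
        omega
      rw [if_neg h, hb]
      simp only [Bool.false_eq_true, if_false]
      exact ih b

lemma pvA_best (g : List (List Int)) (h : pvFlat g ≠ []) :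
    pvBest (pvFlat g) (infer_target_color_from_output_py g) := by
  unfold infer_target_color_from_output_py
  rw [show (g.flatMap (fun row => row.filter (fun c => decide (c ≠ 0)))) = pvFlat g from rfl]
  rw [if_neg h]
  show pvBest (pvFlat g)
    (match PySem.List.max2? (PySem.Dict.counter (pvFlat g)).items
        (fun kv => kv.2) (fun kv => -kv.1) with
     | some kv => kv.1
     | none => 1)
  have hne : PySem.Set.ofList (pvFlat g) ≠ [] := by
    obtain ⟨x, hx⟩ := List.exists_mem_of_ne_nil _ h
    intro he
    have := (PySem.Set.mem_ofList (pvFlat g) x).mpr hx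
    simp [he] at this
  obtain ⟨c0, rest, heq⟩ := List.exists_cons_of_ne_nil hne
  rw [PySem.Dict.items_counter, heq,
    pvMainLoop (fun c => ((pvFlat g).count c : Int)) rest c0]
  show pvBest (pvFlat g) (pvArgmax (fun c => ((pvFlat g).count c : Int)) c0 rest)
  obtain ⟨hm, hb⟩ := pvArgmax_best (fun c => ((pvFlat g).count c : Int)) rest c0
  constructor
  · exact (PySem.Set.mem_ofList (pvFlat g) _).mp (heq ▸ hm)
  · intro d hd
    have hd' : d ∈ c0 :: rest := heq ▸ (PySem.Set.mem_ofList (pvFlat g) d).mpr hd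
    have := hb d hd'
    omega

-- elements remaining after dropping the leading run of c's are strictly greater than c
lemma pvDropWhile_gt (c : Int) : ∀ (t : List Int), t.Pairwise (· ≤ ·) → (∀ d ∈ t, c ≤ d) →
    ∀ d ∈ t.dropWhile (fun d => d == c), c < d := by
  intro t
  induction t with
  | nil => intro _ _ d hd; simp at hd
  | cons a t ih =>
    intro hp hge d hd
    rw [List.dropWhile_cons] at hd
    by_cases ha : a = c
    · rw [if_pos (by simp [ha])] at hd
      exact ih (List.Pairwise.sublist (List.sublist_cons_self a t) hp)
        (fun x hx => hge x (List.mem_cons_of_mem _ hx)) d hd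
    · rw [if_neg (by simp [ha])] at hd
      have hca : c < a := lt_of_le_of_ne (hge a List.mem_cons_self) (Ne.symm ha)
      rcases List.mem_cons.mp hd with rfl | hd2
      · exact hca
      · exact lt_of_lt_of_le hca ((List.pairwise_cons.mp hp).1 d hd2)

-- pvScan on a sorted list either keeps its initial best (all runs ≤ blen)
-- or returns the first longest run's color
lemma pvScan_spec : ∀ (n : Nat) (rest : List Int), rest.length ≤ n →
    ∀ (best : Int) (blen : Nat), rest.Pairwise (· ≤ ·) →
    (pvScan best blen rest = best ∧ ∀ d ∈ rest, rest.count d ≤ blen)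
    ∨ (pvScan best blen rest ∈ rest ∧ blen < rest.count (pvScan best blen rest) ∧
       ∀ d ∈ rest, rest.count d < rest.count (pvScan best blen rest) ∨
         (rest.count d = rest.count (pvScan best blen rest) ∧ pvScan best blen rest ≤ d)) := by
  intro n
  induction n with
  | zero =>
    intro rest hlen best blen _
    have : rest = [] := List.eq_nil_of_length_eq_zero (Nat.le_zero.mp hlen)
    subst this
    left
    exact ⟨by rw [pvScan], by intro d hd; simp at hd⟩
  | succ n ih =>
    intro rest hlen best blen hsort
    match rest with
    | [] =>
      left
      exact ⟨by rw [pvScan], by intro d hd; simp at hd⟩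
    | c :: t =>
      have hpt : t.Pairwise (· ≤ ·) := (List.pairwise_cons.mp hsort).2
      have hct : ∀ d ∈ t, c ≤ d := (List.pairwise_cons.mp hsort).1
      set w := t.takeWhile (fun d => d == c) with hw
      set r' := t.dropWhile (fun d => d == c) with hr'
      have hsplit : w ++ r' = t := List.takeWhile_append_dropWhile
      have hwc : ∀ d ∈ w, d = c := by
        intro d hd
        have := List.mem_takeWhile_imp hd
        simpa using this
      have hgt : ∀ d ∈ r', c < d := pvDropWhile_gt c t hpt hct
      have hpr' : r'.Pairwise (· ≤ ·) := List.Pairwise.sublist (List.dropWhile_sublist _) hpt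
      have hlen' : r'.length ≤ n := by
        have h1 : r'.length ≤ t.length := List.Sublist.length_le (List.dropWhile_sublist _)
        simp only [List.length_cons] at hlen
        omega
      -- counts
      have hcc : (c :: t).count c = 1 + w.length := by
        rw [List.count_cons_self, ← hsplit, List.count_append]
        have h1 : w.count c = w.length := List.count_eq_length.mpr (by
          intro b hb; have := hwc b hb; simp [this])
        have h2 : r'.count c = 0 := List.count_eq_zero.mpr (by
          intro hc; exact absurd (hgt c hc) (lt_irrefl c))
        omega
      have hcd : ∀ d ∈ r', (c :: t).count d = r'.count d := by
        intro d hd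
        have hdc : d ≠ c := by have := hgt d hd; omega
        have h1 : w.count d = 0 := List.count_eq_zero.mpr (by
          intro hc; exact hdc (hwc d hc))
        rw [← hsplit]
        simp [List.count_append, h1, Ne.symm hdc]
      have hmem : ∀ d ∈ c :: t, d = c ∨ d ∈ r' := by
        intro d hd
        rcases List.mem_cons.mp hd with rfl | hd2
        · left; rfl
        · rw [← hsplit] at hd2
          rcases List.mem_append.mp hd2 with h1 | h1
          · left; exact hwc d h1
          · right; exact h1
      have hrmem : ∀ x ∈ r', x ∈ c :: t := by
        intro x hx
        exact List.mem_cons_of_mem _ (hsplit ▸ List.mem_append_right w hx)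
      -- unfold one step of pvScan
      rw [show pvScan best blen (c :: t)
            = if blen < 1 + w.length then pvScan c (1 + w.length) r'
              else pvScan best blen r' from by rw [pvScan]]
      by_cases hb : blen < 1 + w.length
      · rw [if_pos hb]
        rcases ih r' hlen' c (1 + w.length) hpr' with ⟨he, hall⟩ | ⟨hm, hgt2, hall⟩
        · -- kept c: c is the overall winner
          right
          rw [he]
          refine ⟨List.mem_cons_self, by omega, ?_⟩
          intro d hd
          rcases hmem d hd with rfl | hd2
          · right; exact ⟨rfl, le_refl _⟩
          · have h1 := hall d hd2
            have h2 := hcd d hd2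
            have h3 := hgt d hd2
            rcases Nat.lt_or_ge (r'.count d) (1 + w.length) with h4 | h4
            · left; omega
            · right; constructor
              · omega
              · omega
        · -- a later run won
          right
          have hmr : pvScan c (1 + w.length) r' ∈ c :: t := hrmem _ hm
          have hcr : (c :: t).count (pvScan c (1 + w.length) r') = r'.count (pvScan c (1 + w.length) r') :=
            hcd _ hm
          refine ⟨hmr, by omega, ?_⟩
          intro d hd
          rcases hmem d hd with rfl | hd2
          · left; omega
          · have h1 := hall d hd2
            have h2 := hcd d hd2
            omega
      · rw [if_neg hb]
        rcases ih r' hlen' best blen hpr' with ⟨he, hall⟩ | ⟨hm, hgt2, hall⟩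
        · left
          refine ⟨he, ?_⟩
          intro d hd
          rcases hmem d hd with rfl | hd2
          · omega
          · have h1 := hall d hd2
            have h2 := hcd d hd2
            omega
        · right
          have hmr : pvScan best blen r' ∈ c :: t := hrmem _ hm
          have hcr : (c :: t).count (pvScan best blen r') = r'.count (pvScan best blen r') :=
            hcd _ hm
          refine ⟨hmr, by omega, ?_⟩
          intro d hd
          rcases hmem d hd with rfl | hd2
          · left; omega
          · have h1 := hall d hd2
            have h2 := hcd d hd2
            omega

lemma pvB_best (g : List (List Int)) (h : pvFlat g ≠ []) :
    pvBest (pvFlat g) (infer_target_color_from_output_py_alt g) := by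
  unfold infer_target_color_from_output_py_alt
  rw [show (g.flatMap (fun row => row.filter (fun c => decide (c ≠ 0)))) = pvFlat g from rfl]
  have hperm : (PySem.List.sorted (pvFlat g) (fun x => x) false).Perm (pvFlat g) :=
    PySem.List.sorted_perm _ _ _
  have hne : PySem.List.sorted (pvFlat g) (fun x => x) false ≠ [] := by
    intro he
    exact h ((PySem.List.sorted_eq_nil_iff _ _ _).mp he)
  obtain ⟨c, t, heq⟩ := List.exists_cons_of_ne_nil hne
  rw [heq]
  have hsort : (c :: t).Pairwise (· ≤ ·) := by
    have := PySem.List.sorted_pairwise (pvFlat g) (fun x => x)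
    rw [heq] at this
    simpa using this
  rcases pvScan_spec (c :: t).length (c :: t) le_rfl c 0 hsort with ⟨he, hall⟩ | ⟨hm, _, hall⟩
  · exfalso
    have h1 := hall c List.mem_cons_self
    have h2 : 0 < (c :: t).count c := List.count_pos_iff.mpr List.mem_cons_self
    omega
  · have hperm' : (c :: t).Perm (pvFlat g) := heq ▸ hperm
    constructor
    · exact hperm'.mem_iff.mp hm
    · intro d hd
      have hd' : d ∈ c :: t := hperm'.mem_iff.mpr hd
      have := hall d hd'
      rw [hperm'.count_eq d, hperm'.count_eq (pvScan c 0 (c :: t))] at this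
      exact this

-- ===== VERDICT (by name: the statement is the Claim_ definition above) =====
theorem infer_target_color_from_output_py_spec : Claim_equal_infer_target_color_from_output_py := by
  intro g _
  unfold Spec_infer_target_color_from_output_py
  by_cases hf : pvFlat g = []
  · unfold infer_target_color_from_output_py infer_target_color_from_output_py_alt
    have h2 : PySem.List.sorted (pvFlat g) (fun x => x) false = [] := by
      rw [hf]; rfl
    unfold pvFlat at hf h2
    simp only [hf]
    rfl
  · exact pvBest_unique (pvFlat g) _ _ (pvA_best g hf) (pvB_best g hf)
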